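-- pv_equiv track=rewrite | github.com/xiaoye-hua/DataStructure_Algorithm_SQL | problems/736.py | parse_single_part
-- ===== SOURCE A (Python) =====
-- def parse_single_part(lst):
--     res = []
--     single_part = []
--     mark_num = 0
--     for ele in lst:
--         for char in ele:
--             if char == "(":
--                 mark_num += 1
--             if char == ")":
--                 mark_num -= 1
--         single_part.append(ele)
--         if mark_num == 0:
--             res.append(single_part)
--             single_part = []
--     return res
-- ===== SOURCE B (Python) =====
-- def parse_single_part(lst):
--     # Pass 1: per-element net parenthesis balance (table of deltas).
--     deltas = [sum(1 if c == "(" else (-1 if c == ")" else 0) for c in ele)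
--               for ele in lst]
--     # Pass 2: cumulative balance + start index; emit slices where it hits 0.
--     res = []
--     bal = 0
--     start = 0
--     for i, d in enumerate(deltas):
--         bal += d
--         if bal == 0:
--             res.append(lst[start:i + 1])
--             start = i + 1
--     return res
-- ===== Notes on version B (the rewrite author's own statement) =====
-- stated objective: alternative
-- what changed: Replaces the single accumulate-into-buffer pass (which appends each element to a growing current-part list) with two passes: first a table of per-element net parenthesis deltas, then a scan over enumerate(deltas) keeping a cumulative balance and a start index, emitting lst[start:i+1] slices when the balance reaches zero.
import Mathlib
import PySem

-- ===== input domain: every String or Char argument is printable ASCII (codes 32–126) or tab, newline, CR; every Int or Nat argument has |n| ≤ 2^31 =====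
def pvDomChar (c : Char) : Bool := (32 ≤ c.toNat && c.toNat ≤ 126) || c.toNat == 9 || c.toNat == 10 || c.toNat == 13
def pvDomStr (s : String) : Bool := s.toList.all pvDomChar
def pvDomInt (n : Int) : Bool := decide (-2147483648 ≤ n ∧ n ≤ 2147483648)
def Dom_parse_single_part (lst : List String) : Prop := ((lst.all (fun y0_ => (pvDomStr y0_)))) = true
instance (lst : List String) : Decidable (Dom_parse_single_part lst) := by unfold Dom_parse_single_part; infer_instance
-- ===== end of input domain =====

-- B replaces A's accumulate-into-buffer pass by a per-element delta table plus a
-- balance/start-index scan that emits slices; same result, different decomposition.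

-- ===== PORT A =====
-- inner 'for char in ele' loop of A: two independent ifs on each character
def psACharStep (m : Int) (c : Char) : Int :=
  let m1 := if c = '(' then m + 1 else m
  if c = ')' then m1 - 1 else m1

-- outer 'for ele in lst' loop of A, state (res, single_part, mark_num)
def psALoop : List String → List (List String) → List String → Int → List (List String)
  | [], res, _, _ => res
  | ele :: rest, res, part, mark =>
    let mark := ele.toList.foldl psACharStep mark
    let part := part ++ [ele]
    if mark = 0 then psALoop rest (res ++ [part]) [] mark
    else psALoop rest res part mark

def parse_single_part (lst : List String) : List (List String) :=
  psALoop lst [] [] 0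

-- ===== PORT B =====
-- delta of one element: sum(1 if c == '(' else (-1 if c == ')' else 0) for c in ele)
def psDelta (s : String) : Int :=
  (s.toList.map (fun c => if c = '(' then (1 : Int) else if c = ')' then -1 else 0)).sum

-- second pass of B over enumerate(deltas), state (bal, start, res)
def psBLoop (lst : List String) : List (Int × Int) → Int → Int → List (List String) → List (List String)
  | [], _, _, res => res
  | (i, d) :: rest, bal, start, res =>
    let bal := bal + d
    if bal = 0 then psBLoop lst rest bal (i + 1) (res ++ [PySem.List.slice lst (some start) (some (i + 1))])
    else psBLoop lst rest bal start res

def parse_single_part_alt (lst : List String) : List (List String) :=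
  let deltas := lst.map psDelta
  psBLoop lst (PySem.List.enumerate deltas 0) 0 0 []

-- ===== PRECONDITION & SPEC =====
def Spec_parse_single_part (lst : List String) (out : List (List String)) : Prop := out = parse_single_part_alt lst
instance (lst : List String) (out : List (List String)) : Decidable (Spec_parse_single_part lst out) := by unfold Spec_parse_single_part; infer_instance

-- ===== CLAIM (what is proved, stated in full; the proofs are below) =====
def Claim_equal_parse_single_part : Prop := ∀ (lst : List String), Dom_parse_single_part lst → Spec_parse_single_part lst (parse_single_part lst)

-- ===== LEMMAS AND PROOFS =====

-- A's char loop adds exactly B's delta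
theorem psCharLoop_eq (cs : List Char) (m : Int) :
    cs.foldl psACharStep m = m + (cs.map (fun c => if c = '(' then (1 : Int) else if c = ')' then -1 else 0)).sum := by
  induction cs generalizing m with
  | nil => simp
  | cons c cs ih =>
    rw [List.foldl_cons, ih, List.map_cons, List.sum_cons]
    unfold psACharStep
    split_ifs with h1 h2 <;> (try (subst h1; simp at h2)) <;> ring

-- main invariant: with part = full[start:i] and rest = full.drop i, the two loops agree
theorem psLoop_eq (full : List String) (rest : List String) (i start : Nat) (bal : Int)
    (res : List (List String)) (hrest : full.drop i = rest) (hsi : start <= i) :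
    psALoop rest res ((full.drop start).take (i - start)) bal
      = psBLoop full (PySem.List.enumerate (rest.map psDelta) (i : Int)) bal (start : Int) res := by
  induction rest generalizing i start bal res with
  | nil => simp [psALoop, psBLoop]
  | cons ele rest ih =>
    have hi : i < full.length := by
      by_contra h
      simp [List.drop_eq_nil_of_le (Nat.le_of_not_lt h)] at hrest
    rw [List.drop_eq_getElem_cons hi] at hrest
    have hget : full[i] = ele := (List.cons_eq_cons.mp hrest).1
    have hdrop : full.drop (i + 1) = rest := (List.cons_eq_cons.mp hrest).2
    simp only [List.map_cons, PySem.List.enumerate_cons, psALoop, psBLoop]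
    rw [psCharLoop_eq,
      show (ele.toList.map (fun c => if c = '(' then (1 : Int) else if c = ')' then -1 else 0)).sum
        = psDelta ele from rfl]
    have hpart : (full.drop start).take (i - start) ++ [ele]
        = (full.drop start).take (i + 1 - start) := by
      have hlen : i - start < (full.drop start).length := by
        simp only [List.length_drop]; omega
      rw [show i + 1 - start = (i - start) + 1 by omega, List.take_add_one,
        List.getElem?_eq_getElem hlen]
      congr 2
      rw [List.getElem_drop]
      simp only [show start + (i - start) = i by omega]
      exact hget.symm
    by_cases hb : bal + psDelta ele = 0
    · rw [if_pos hb, if_pos hb, hpart]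
      rw [show ((i : Int) + 1) = ((i + 1 : Nat) : Int) by push_cast; ring,
        PySem.List.slice_natCast]
      have := ih (i + 1) (i + 1) (bal + psDelta ele)
        (res ++ [(full.drop start).take (i + 1 - start)]) hdrop (le_refl _)
      simp only [Nat.sub_self, List.take_zero] at this
      exact this
    · rw [if_neg hb, if_neg hb, hpart]
      have := ih (i + 1) start (bal + psDelta ele) res hdrop (by omega)
      push_cast at this
      exact this

-- ===== VERDICT (by name: the statement is the Claim_ definition above) =====
theorem parse_single_part_spec : Claim_equal_parse_single_part := by
  intro lst _
  unfold Spec_parse_single_part parse_single_part parse_single_part_alt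
  have := psLoop_eq lst lst 0 0 0 [] (by simp) (le_refl _)
  simpa using this
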